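-- pv_equiv track=rewrite | github.com/robotframework/robotframework | src/robot/serializing/templating.py | _get_if_and_else_blocks
-- ===== SOURCE A (Python) =====
-- PRE = '<!-- '
--
-- POST = ' -->'
--
-- def _get_if_and_else_blocks(block_lines):
--     else_line = PRE + 'ELSE' + POST
--     if_block = []
--     else_block = []
--     block = if_block
--     for line in block_lines:
--         if line.strip() == else_line:
--             block = else_block
--         else:
--             block.append(line)
--     return if_block, else_block
-- ===== SOURCE B (Python) =====
-- PRE = '<!-- '
--
-- POST = ' -->'
--
-- def _get_if_and_else_blocks(block_lines):
--     marker = PRE + 'ELSE' + POST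
--     for i, line in enumerate(block_lines):
--         if line.strip() == marker:
--             return (block_lines[:i],
--                     [l for l in block_lines[i + 1:] if l.strip() != marker])
--     return list(block_lines), []
-- ===== Notes on version B (the rewrite author's own statement) =====
-- stated objective: alternative
-- what changed: Replaces A's single stateful loop (a mutable 'block' alias switching targets) by an index scan for the first ELSE marker plus slicing: the prefix is the if-block and the post-marker suffix filtered of marker lines is the else-block.
import Mathlib
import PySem

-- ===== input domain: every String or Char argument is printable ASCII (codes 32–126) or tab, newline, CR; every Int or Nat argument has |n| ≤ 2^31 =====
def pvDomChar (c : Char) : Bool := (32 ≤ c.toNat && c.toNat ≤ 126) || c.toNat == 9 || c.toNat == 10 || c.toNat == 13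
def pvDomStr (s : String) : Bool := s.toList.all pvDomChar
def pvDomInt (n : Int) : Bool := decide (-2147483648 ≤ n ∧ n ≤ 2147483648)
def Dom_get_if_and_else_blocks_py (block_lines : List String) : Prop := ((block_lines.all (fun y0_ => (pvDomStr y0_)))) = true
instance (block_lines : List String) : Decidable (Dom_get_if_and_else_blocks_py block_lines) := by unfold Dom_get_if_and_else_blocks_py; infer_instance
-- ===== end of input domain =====

-- ===== PORT A =====
-- B differs from A by decomposition: A drives one stateful loop with a mutable block alias;
-- B finds the first ELSE-marker index and slices/filters. Return-value equivalence only (no mutation in either).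
def pvMarker : String := "<!-- " ++ "ELSE" ++ " -->"

def pvALoop (else_line : String) (ifb elseb : List String) (inElse : Bool) :
    List String → List String × List String
  | [] => (ifb, elseb)
  | l :: rest =>
    if PySem.Str.strip l = else_line then pvALoop else_line ifb elseb true rest
    else if inElse then pvALoop else_line ifb (elseb ++ [l]) true rest
    else pvALoop else_line (ifb ++ [l]) elseb false rest

def get_if_and_else_blocks_py (block_lines : List String) : List String × List String :=
  pvALoop pvMarker [] [] false block_lines

-- ===== PORT B =====
-- Source B's enumerate-scan for the first marker is the library findIdx?; slices with
-- nonnegative bounds block_lines[:i] / block_lines[i+1:] are exactly take i / drop (i+1).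
def get_if_and_else_blocks_py_alt (block_lines : List String) : List String × List String :=
  match block_lines.findIdx? (fun l => PySem.Str.strip l == pvMarker) with
  | some i => (block_lines.take i,
               (block_lines.drop (i + 1)).filter (fun l => PySem.Str.strip l != pvMarker))
  | none => (block_lines, [])

-- ===== PRECONDITION & SPEC =====
def Spec_get_if_and_else_blocks_py (block_lines : List String) (out : List String × List String) : Prop := out = get_if_and_else_blocks_py_alt block_lines
instance (block_lines : List String) (out : List String × List String) : Decidable (Spec_get_if_and_else_blocks_py block_lines out) := by unfold Spec_get_if_and_else_blocks_py; infer_instance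

-- ===== CLAIM (what is proved, stated in full; the proofs are below) =====
def Claim_equal_get_if_and_else_blocks_py : Prop := ∀ (block_lines : List String), Dom_get_if_and_else_blocks_py block_lines → Spec_get_if_and_else_blocks_py block_lines (get_if_and_else_blocks_py block_lines)

-- ===== LEMMAS AND PROOFS =====
theorem pvALoop_after (m : String) (rest : List String) : ∀ (ifb elseb : List String),
    pvALoop m ifb elseb true rest
      = (ifb, elseb ++ rest.filter (fun l => PySem.Str.strip l != m)) := by
  induction rest with
  | nil => intro ifb elseb; simp [pvALoop]
  | cons l rest ih =>
    intro ifb elseb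
    by_cases h : PySem.Str.strip l = m
    · simp [pvALoop, h, ih]
    · simp [pvALoop, h, ih]

theorem pvALoop_before (m : String) (bl : List String) : ∀ (ifb : List String),
    pvALoop m ifb [] false bl
      = match bl.findIdx? (fun l => PySem.Str.strip l == m) with
        | some i => (ifb ++ bl.take i,
                     (bl.drop (i + 1)).filter (fun l => PySem.Str.strip l != m))
        | none => (ifb ++ bl, []) := by
  induction bl with
  | nil => intro ifb; simp [pvALoop]
  | cons l rest ih =>
    intro ifb
    by_cases h : PySem.Str.strip l = m
    · simp [pvALoop, h, List.findIdx?_cons, pvALoop_after]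
    · rw [List.findIdx?_cons]
      simp only [h, beq_iff_eq]
      rw [pvALoop, if_neg h, if_neg (by simp), ih]
      cases hf : rest.findIdx? (fun l => PySem.Str.strip l == m) with
      | none => simp
      | some i => simp

-- ===== VERDICT (by name: the statement is the Claim_ definition above) =====
theorem get_if_and_else_blocks_py_spec : Claim_equal_get_if_and_else_blocks_py := by
  intro bl _
  unfold Spec_get_if_and_else_blocks_py get_if_and_else_blocks_py get_if_and_else_blocks_py_alt
  rw [pvALoop_before]
  cases hf : bl.findIdx? (fun l => PySem.Str.strip l == pvMarker) <;> simp
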